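-- pv_equiv track=rewrite | github.com/AllSeeingEyeTolledEweSew/tvaf-btn | tvaf/btn.py | _slash_variations
-- ===== SOURCE A (Python) =====
-- from typing import Iterator
--
-- def _slash_variations(name: str) -> Iterator[str]:
--     """Yields name variations to reverse slash-mangling.
--
--     On BTN, many series and group names have "/" characters. When naming a
--     directory after a series, We replace the "/" with "_", so "Nip/Tuck"
--     becomes "Nip_Tuck".
--
--     When looking up a series by a mangled name, we need to figure out what name
--     we originally meant.
--
--     This function yields every combination of replacing a "_" with a "/", so a
--     lookup function can try all possible variations.
--
--     Since this approach is exponential, we'll only try to replace 5 "_"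
--     characters. In practice, I have only seen up to 4 "_" or "/" characters in
--     a group or series name on BTN.
--
--     Args:
--         name: A name to unmangle.
--
--     Yields:
--         Variations of name, with "_" characters replaced by "/".
--     """
--     indexes = []
--     for index, char in enumerate(name):
--         if char == "_":
--             indexes.append(index)
--     count = min(2**len(indexes), 32)
--     for bitmap in range(count):
--         value = name
--         for bit, index in enumerate(indexes):
--             if bitmap & (1 << bit):
--                 value = value[:index] + "/" + value[index + 1:]
--         yield value
-- ===== SOURCE B (Python) =====
-- from typing import Iterator
--
-- def _slash_variations(name: str) -> Iterator[str]:
--     """Yields every variant of name with "_" replaced by "/" (first 5 "_" only),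
--     in the same order as counting a bitmask (first underscore varies fastest)."""
--     positions = [i for i, c in enumerate(name) if c == "_"][:5]
--     variants = [name]
--     # Branch on each position, last position outermost, so the first "_" toggles fastest.
--     for p in reversed(positions):
--         variants = [w for v in variants for w in (v, v[:p] + "/" + v[p + 1:])]
--     yield from variants
-- ===== Notes on version B (the rewrite author's own statement) =====
-- stated objective: alternative
-- what changed: Replaces the bitmap-counting loop (try every bitmap < min(2^k,32), re-scanning all underscore indexes per bitmap) by a doubling construction: take the first 5 underscore positions and fold over them in reverse, doubling the variant list by branching keep-'_'/substitute-'/' at each position, which yields the same variants in the same order with each replacement done once per produced variant.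
import Mathlib
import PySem

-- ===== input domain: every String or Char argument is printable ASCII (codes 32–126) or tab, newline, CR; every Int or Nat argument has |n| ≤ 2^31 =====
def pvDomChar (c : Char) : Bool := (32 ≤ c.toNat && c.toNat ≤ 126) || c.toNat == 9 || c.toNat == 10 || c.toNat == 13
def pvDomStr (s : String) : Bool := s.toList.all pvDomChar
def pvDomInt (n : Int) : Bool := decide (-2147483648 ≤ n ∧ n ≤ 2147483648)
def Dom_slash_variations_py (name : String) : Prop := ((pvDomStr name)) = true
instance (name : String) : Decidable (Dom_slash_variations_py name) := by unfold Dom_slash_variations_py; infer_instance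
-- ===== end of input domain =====

-- B replaces A's bitmap-counting loop by a list-doubling fold over the first 5 underscore
-- positions (reverse order, so the first underscore toggles fastest): same variants, same order.

-- ===== PORT A =====
-- value[:index] + "/" + value[index+1:]  (exact: PySem.List.slice is Python slicing)
def pvRepA (value : List Char) (index : Int) : List Char :=
  PySem.List.slice value none (some index) ++ ['/'] ++ PySem.List.slice value (some (index + 1)) none

def slash_variations_py (name : String) : List String :=
  -- indexes = []; for index, char in enumerate(name): if char == "_": indexes.append(index)
  let indexes : List Int := (PySem.List.enumerate name.toList 0).foldl
    (fun acc ic => if ic.2 == '_' then acc ++ [ic.1] else acc) []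
  -- count = min(2**len(indexes), 32)
  let count : Nat := min (2 ^ indexes.length) 32
  -- for bitmap in range(count): … yield value   (bitmap ≥ 0 always, so Nat via List.range is
  -- exact; the bit position from enumerate is ≥ 0, read back as Nat with .toNat — exact)
  (List.range count).foldl (fun acc bitmap =>
    let value := (PySem.List.enumerate indexes 0).foldl
      (fun value bi => if bitmap &&& (1 <<< bi.1.toNat) ≠ 0 then pvRepA value bi.2 else value)
      name.toList
    acc ++ [String.mk value]) []

-- ===== PORT B =====
-- v[:p] + "/" + v[p+1:]  (exact: PySem.List.slice is Python slicing)
def pvRepB (v : List Char) (p : Int) : List Char :=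
  PySem.List.slice v none (some p) ++ ['/'] ++ PySem.List.slice v (some (p + 1)) none

def slash_variations_py_alt (name : String) : List String :=
  -- positions = [i for i, c in enumerate(name) if c == "_"][:5]  ([:5] with a literal ≥ 0 is take 5 — exact)
  let positions : List Int :=
    (((PySem.List.enumerate name.toList 0).filter (fun ic => ic.2 == '_')).map (fun ic => ic.1)).take 5
  -- for p in reversed(positions): variants = [w for v in variants for w in (v, v[:p]+"/"+v[p+1:])]
  let variants := positions.reverse.foldl
    (fun vs p => vs.flatMap (fun v => [v, pvRepB v p])) [name.toList]
  variants.map String.mk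

-- ===== PRECONDITION & SPEC =====
def Spec_slash_variations_py (name : String) (out : List String) : Prop := out = slash_variations_py_alt name
instance (name : String) (out : List String) : Decidable (Spec_slash_variations_py name out) := by unfold Spec_slash_variations_py; infer_instance

-- ===== CLAIM (what is proved, stated in full; the proofs are below) =====
def Claim_equal_slash_variations_py : Prop := ∀ (name : String), Dom_slash_variations_py name → Spec_slash_variations_py name (slash_variations_py name)

-- ===== LEMMAS AND PROOFS =====

-- Reference recursion for A's inner loop: consume positions, shifting the bitmap right.
def pvApplyBits (b : Nat) (ps : List Int) (s : List Char) : List Char :=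
  match ps with
  | [] => s
  | p :: tl => pvApplyBits (b >>> 1) tl (if b &&& 1 ≠ 0 then pvRepA s p else s)

theorem pvRepB_eq_repA (v : List Char) (p : Int) : pvRepB v p = pvRepA v p := rfl

theorem pvRep_eq_set (s : List Char) (k : Nat) (hk : k < s.length) :
    pvRepA s (k : Int) = s.set k '/' := by
  have h1 : PySem.List.slice s none (some (k : Int)) = s.take k := PySem.List.slice_to_natCast s k
  have h2 : PySem.List.slice s (some ((k : Int) + 1)) none = s.drop (k + 1) := by
    have := PySem.List.slice_from_natCast s (k + 1)
    simpa [Nat.cast_add] using this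
  simp [pvRepA, h1, h2, List.set_eq_take_append_cons_drop, hk]

theorem pvRep_length (s : List Char) (k : Nat) (hk : k < s.length) :
    (pvRepA s (k : Int)).length = s.length := by
  rw [pvRep_eq_set s k hk]; simp

theorem pvRep_comm (s : List Char) (k j : Nat) (hk : k < s.length) (hj : j < s.length) :
    pvRepA (pvRepA s (j : Int)) (k : Int) = pvRepA (pvRepA s (k : Int)) (j : Int) := by
  by_cases h : k = j
  · subst h; rfl
  · rw [pvRep_eq_set s j hj, pvRep_eq_set s k hk,
        pvRep_eq_set _ k (by simpa using hk), pvRep_eq_set _ j (by simpa using hj)]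
    exact List.set_comm _ _ (fun e => h e.symm)

theorem pvApplyBits_rep_comm (ps : List Int) (b : Nat) (s : List Char) (k : Nat)
    (H : ∀ q ∈ ps, ∃ m : Nat, q = (m : Int) ∧ m < s.length) (hk : k < s.length) :
    pvApplyBits b ps (pvRepA s (k : Int)) = pvRepA (pvApplyBits b ps s) (k : Int) := by
  induction ps generalizing b s with
  | nil => rfl
  | cons p tl ih =>
    obtain ⟨j, hp, hj⟩ := H p (List.mem_cons_self ..)
    subst hp
    have Htl : ∀ q ∈ tl, ∃ m : Nat, q = (m : Int) ∧ m < s.length := fun q hq => by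
      obtain ⟨m, hm, hml⟩ := H q (List.mem_cons_of_mem _ hq); exact ⟨m, hm, hml⟩
    rw [pvApplyBits, pvApplyBits]
    by_cases hb : b &&& 1 ≠ 0
    · rw [if_pos hb, if_pos hb]
      rw [pvRep_comm s j k hj hk]
      exact ih (b >>> 1) (pvRepA s (j : Int))
        (fun q hq => by
          obtain ⟨m, hm, hml⟩ := Htl q hq
          exact ⟨m, hm, by rw [pvRep_length s j hj]; exact hml⟩)
        (by rw [pvRep_length s j hj]; exact hk)
    · rw [if_neg hb, if_neg hb]
      exact ih (b >>> 1) s Htl hk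

theorem pvApplyBits_zero (ps : List Int) (s : List Char) : pvApplyBits 0 ps s = s := by
  induction ps generalizing s with
  | nil => rfl
  | cons p tl ih => simp [pvApplyBits, ih]

theorem pvApplyBits_take (ps : List Int) (m b : Nat) (s : List Char) (hb : b < 2 ^ m) :
    pvApplyBits b ps s = pvApplyBits b (ps.take m) s := by
  induction ps generalizing m b s with
  | nil => simp
  | cons p tl ih =>
    cases m with
    | zero =>
      have hb0 : b = 0 := by simpa using hb
      subst hb0
      simp [pvApplyBits_zero]
    | succ m =>
      rw [List.take_succ_cons, pvApplyBits, pvApplyBits]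
      refine ih m (b >>> 1) _ ?_
      rw [Nat.shiftRight_eq_div_pow, pow_succ] at *
      omega

-- A's inner enumerate-fold equals pvApplyBits (generalized over the enumerate start)
theorem pvInner_eq_applyBits (ps : List Int) (j b : Nat) (s : List Char) :
    (PySem.List.enumerate ps (j : Int)).foldl
      (fun value bi => if b &&& (1 <<< bi.1.toNat) ≠ 0 then pvRepA value bi.2 else value) s
    = pvApplyBits (b >>> j) ps s := by
  induction ps generalizing j s with
  | nil => rfl
  | cons p tl ih =>
    rw [PySem.List.enumerate_cons, List.foldl_cons, pvApplyBits]
    dsimp only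
    have hcast : (j : Int) + 1 = ((j + 1 : Nat) : Int) := by push_cast; ring
    have hcond : (b &&& 1 <<< ((j : Int)).toNat ≠ 0) ↔ ((b >>> j) &&& 1 ≠ 0) := by
      rw [Int.toNat_natCast, Nat.shiftRight_eq_div_pow, Nat.and_one_is_mod,
        Nat.one_shiftLeft, Nat.and_two_pow]
      have h2j : (2 : Nat) ^ j ≠ 0 := by positivity
      have ht : b.testBit j = decide (b / 2 ^ j % 2 = 1) := by
        rw [Nat.testBit, Nat.and_comm, Nat.and_one_is_mod, Nat.shiftRight_eq_div_pow]
        rcases Nat.mod_two_eq_zero_or_one (b / 2 ^ j) with h | h <;> simp [h]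
      rw [ht]
      rcases Nat.mod_two_eq_zero_or_one (b / 2 ^ j) with h | h <;> simp [h, h2j]
    simp only [hcond]
    rw [hcast, ih (j + 1), Nat.shiftRight_add, Nat.shiftRight_succ]

theorem pvRange_two_mul (n : Nat) :
    List.range (2 * n) = (List.range n).flatMap (fun q => [2 * q, 2 * q + 1]) := by
  induction n with
  | zero => rfl
  | succ n ih =>
    have h : 2 * (n + 1) = (2 * n) + 1 + 1 := by ring
    rw [h, List.range_succ, List.range_succ, List.range_succ, ih]
    simp

-- main lemma: bitmap-counting order equals the reverse doubling fold
theorem pvMain (ps : List Int) (s : List Char)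
    (H : ∀ q ∈ ps, ∃ k : Nat, q = (k : Int) ∧ k < s.length) :
    (List.range (2 ^ ps.length)).map (fun b => pvApplyBits b ps s)
    = ps.reverse.foldl (fun vs p => vs.flatMap (fun v => [v, pvRepB v p])) [s] := by
  induction ps generalizing s with
  | nil => rfl
  | cons p tl ih =>
    obtain ⟨k, hp, hk⟩ := H p (List.mem_cons_self ..)
    have Htl : ∀ q ∈ tl, ∃ m : Nat, q = (m : Int) ∧ m < s.length := fun q hq => by
      obtain ⟨m, hm, hml⟩ := H q (List.mem_cons_of_mem _ hq); exact ⟨m, hm, hml⟩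
    rw [List.reverse_cons, List.foldl_append, List.foldl_cons, List.foldl_nil, ← ih s Htl]
    have hpow : 2 ^ (p :: tl).length = 2 * 2 ^ tl.length := by
      rw [List.length_cons, pow_succ]; ring
    rw [hpow, pvRange_two_mul, List.map_flatMap, List.flatMap_map]
    refine List.flatMap_congr (fun q _ => ?_)
    have he0 : (2 * q) &&& 1 = 0 := by
      rw [Nat.and_one_is_mod]; omega
    have he1 : (2 * q + 1) &&& 1 = 1 := by
      rw [Nat.and_one_is_mod]; omega
    have hs0 : (2 * q) >>> 1 = q := by
      rw [Nat.shiftRight_one]; omega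
    have hs1 : (2 * q + 1) >>> 1 = q := by
      rw [Nat.shiftRight_one]; omega
    subst hp
    have hL : pvApplyBits (2 * q) ((k : Int) :: tl) s = pvApplyBits q tl s := by
      rw [pvApplyBits, hs0, if_neg (by simp [he0])]
    have hR : pvApplyBits (2 * q + 1) ((k : Int) :: tl) s
        = pvRepB (pvApplyBits q tl s) (k : Int) := by
      rw [pvApplyBits, hs1, if_pos (by simp [he1]), pvRepB_eq_repA]
      exact pvApplyBits_rep_comm tl q s k Htl hk
    simp only [List.map_cons, List.map_nil, hL, hR]

-- positions appearing in the index list are natCasts of valid indices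
theorem pvIndexes_mem (l : List Char) (q : Int)
    (hq : q ∈ ((PySem.List.enumerate l 0).filter (fun ic => ic.2 == '_')).map (fun ic => ic.1)) :
    ∃ k : Nat, q = (k : Int) ∧ k < l.length := by
  obtain ⟨⟨i, c⟩, hmem, rfl⟩ := List.mem_map.mp hq
  have hmem' := (List.mem_filter.mp hmem).1
  rw [PySem.List.mem_enumerate_iff] at hmem'
  obtain ⟨k, hlt, hpk⟩ := hmem'
  exact ⟨k, by simp [Prod.ext_iff] at hpk; simp [hpk.1], hlt⟩

theorem pvCount_eq (L : Nat) : min (2 ^ L) 32 = 2 ^ (min L 5) := by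
  by_cases h : L ≤ 5
  · rw [Nat.min_eq_left h]
    exact Nat.min_eq_left (by calc 2 ^ L ≤ 2 ^ 5 := Nat.pow_le_pow_right (by norm_num) h
                                  _ = 32 := by norm_num)
  · push_neg at h
    rw [Nat.min_eq_right (le_of_lt h)]
    refine Nat.min_eq_right ?_
    calc (32 : Nat) = 2 ^ 5 := by norm_num
      _ ≤ 2 ^ L := Nat.pow_le_pow_right (by norm_num) (le_of_lt h)

theorem pvTake_min (ps : List Int) (m : Nat) (hm : m = min ps.length 5) :
    ps.take m = ps.take 5 := by
  by_cases h : ps.length ≤ 5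
  · rw [hm, Nat.min_eq_left h, List.take_length, List.take_of_length_le h]
  · push_neg at h
    rw [hm, Nat.min_eq_right (le_of_lt h)]

-- ===== VERDICT (by name: the statement is the Claim_ definition above) =====
theorem slash_variations_py_spec : Claim_equal_slash_variations_py := by
  intro name _
  unfold Spec_slash_variations_py slash_variations_py slash_variations_py_alt
  simp only []
  set l := name.toList with hl
  set I : List Int := ((PySem.List.enumerate l 0).filter (fun ic => ic.2 == '_')).map (fun ic => ic.1) with hI
  have hidx : (PySem.List.enumerate l 0).foldl
      (fun acc ic => if ic.2 == '_' then acc ++ [ic.1] else acc) ([] : List Int) = I := by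
    rw [PySem.List.foldl_append_if]; rw [List.nil_append, hI]
  rw [hidx]
  set m : Nat := min I.length 5 with hm
  have hcount : min (2 ^ I.length) 32 = 2 ^ m := pvCount_eq I.length
  rw [hcount]
  rw [PySem.List.foldl_append_singleton_eq_map]
  simp only [List.nil_append]
  have hinner : ∀ b : Nat, (PySem.List.enumerate I 0).foldl
      (fun value bi => if b &&& (1 <<< bi.1.toNat) ≠ 0 then pvRepA value bi.2 else value) l
      = pvApplyBits b I l := by
    intro b
    have := pvInner_eq_applyBits I 0 b l
    simpa using this
  have hstep : (List.range (2 ^ m)).map (fun bitmap => String.mk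
        ((PySem.List.enumerate I 0).foldl
          (fun value bi => if bitmap &&& (1 <<< bi.1.toNat) ≠ 0 then pvRepA value bi.2 else value) l))
      = ((List.range (2 ^ m)).map (fun b => pvApplyBits b (I.take 5) l)).map String.mk := by
    rw [List.map_map]
    refine List.map_congr_left (fun b hb => ?_)
    have hblt : b < 2 ^ m := List.mem_range.mp hb
    rw [hinner b, pvApplyBits_take I m b l hblt, pvTake_min I m hm]
    rfl
  rw [hstep]
  have hlen : (I.take 5).length = m := by
    rw [List.length_take, hm, Nat.min_comm]
  have Hmem : ∀ q ∈ I.take 5, ∃ k : Nat, q = (k : Int) ∧ k < l.length := fun q hq =>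
    pvIndexes_mem l q (List.mem_of_mem_take hq)
  have := pvMain (I.take 5) l Hmem
  rw [hlen] at this
  rw [this]
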